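-- pv_equiv track=rewrite | github.com/kloklee88/quack-discord-bot | quack_service.py | print_quack
-- ===== SOURCE A (Python) =====
-- def print_quack(number):
--   result = 'Quack'
--   if number >= 2:
--     i = 1
--     while number > i:
--       if i > 10:
--         break
--       result += ' quack'
--       i += 1
--   result += '!'
--   return result
-- ===== SOURCE B (Python) =====
-- def print_quack(number):
--   return 'Quack' + ' quack' * min(number - 1, 10) + '!'
-- ===== Notes on version B (the rewrite author's own statement) =====
-- stated objective: simpler
-- what changed: Replaced the guarded while-loop accumulating ' quack' with a single closed-form expression using string repetition of min(number-1, 10).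
import Mathlib
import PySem

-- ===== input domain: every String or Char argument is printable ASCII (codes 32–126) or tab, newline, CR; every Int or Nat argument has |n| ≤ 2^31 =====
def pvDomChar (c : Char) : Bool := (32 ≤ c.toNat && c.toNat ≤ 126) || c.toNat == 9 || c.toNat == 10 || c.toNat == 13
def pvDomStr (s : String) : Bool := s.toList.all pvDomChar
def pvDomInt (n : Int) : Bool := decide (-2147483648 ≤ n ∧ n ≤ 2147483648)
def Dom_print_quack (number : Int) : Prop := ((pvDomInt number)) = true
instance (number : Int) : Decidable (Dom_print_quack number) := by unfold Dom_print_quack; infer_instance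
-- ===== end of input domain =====

-- B replaces A's guarded while-loop with a single closed-form string-repetition expression (objective: simpler).

-- ===== PORT A =====
-- the 'while number > i: if i > 10: break; result += ' quack'; i += 1' loop, step for step
def pqLoop (number : Int) (i : Int) (result : String) : String :=
  if number > i then
    if i > 10 then result
    else pqLoop number (i + 1) (result ++ " quack")
  else result
termination_by (min number 12 - i).toNat
decreasing_by omega

def print_quack (number : Int) : String :=
  let result := "Quack"
  let result := if number ≥ 2 then pqLoop number 1 result else result
  result ++ "!"

-- ===== PORT B =====
-- ' quack' * n: Python repetition, empty for n ≤ 0 (Int.toNat clamps), exact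
def pyStrMul (s : String) (n : Int) : String := String.join (List.replicate n.toNat s)

def print_quack_alt (number : Int) : String :=
  "Quack" ++ pyStrMul " quack" (min (number - 1) 10) ++ "!"

-- ===== PRECONDITION & SPEC =====
def Spec_print_quack (number : Int) (out : String) : Prop := out = print_quack_alt number
instance (number : Int) (out : String) : Decidable (Spec_print_quack number out) := by unfold Spec_print_quack; infer_instance

-- ===== CLAIM (what is proved, stated in full; the proofs are below) =====
def Claim_equal_print_quack : Prop := ∀ (number : Int), Dom_print_quack number → Spec_print_quack number (print_quack number)

-- ===== LEMMAS AND PROOFS =====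
theorem foldl_append_shift (l : List String) (a : String) :
    l.foldl (· ++ ·) a = a ++ l.foldl (· ++ ·) "" := by
  induction l generalizing a with
  | nil => simp
  | cons x xs ih => rw [List.foldl_cons, List.foldl_cons, ih, ih ("" ++ x)]; simp [String.append_assoc]

theorem join_replicate_succ (n : Nat) (s : String) :
    String.join (List.replicate (n + 1) s) = s ++ String.join (List.replicate n s) := by
  simp only [String.join, List.replicate, List.foldl_cons]
  rw [foldl_append_shift]
  simp

theorem pqLoop_closed (number i : Int) (result : String) :
    pqLoop number i result = result ++ String.join (List.replicate (min number 11 - i).toNat " quack") := by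
  fun_induction pqLoop number i result with
  | case1 i result h1 h2 =>
    have hc : (min number 11 - i).toNat = 0 := by omega
    simp [hc, String.join]
  | case2 i result h1 h2 ih =>
    have hc : (min number 11 - i).toNat = ((min number 11 - (i + 1)).toNat) + 1 := by omega
    rw [ih, hc, join_replicate_succ, String.append_assoc]
  | case3 i result h1 =>
    have hc : (min number 11 - i).toNat = 0 := by omega
    simp [hc, String.join]

-- ===== VERDICT (by name: the statement is the Claim_ definition above) =====
theorem print_quack_spec : Claim_equal_print_quack := by
  intro number _
  unfold Spec_print_quack print_quack print_quack_alt pyStrMul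
  by_cases h : number ≥ 2
  · have hc : (min number 11 - 1).toNat = (min (number - 1) 10).toNat := by omega
    simp [h, pqLoop_closed, hc, String.append_assoc]
  · have hc : (min (number - 1) 10).toNat = 0 := by omega
    simp [h, hc, String.join]
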